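-- pv_equiv track=rewrite | github.com/RAKUDEJI/wacli | scripts/gen_wasm_oci_config.py | _parse_world_root_imports_exports
-- ===== SOURCE A (Python) =====
-- def _parse_world_root_imports_exports(wit_text: str) -> tuple[list[str], list[str]]:
--     inside = False
--     imports: list[str] = []
--     exports: list[str] = []
--     for line in wit_text.splitlines():
--         s = line.strip()
--         if s == "world root {":
--             inside = True
--             continue
--         if inside and s == "}":
--             break
--         if not inside:
--             continue
--         if s.startswith("import "):
--             imports.append(s[len("import ") :].rstrip(";").strip())
--         elif s.startswith("export "):
--             exports.append(s[len("export ") :].rstrip(";").strip())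
--     return imports, exports
-- ===== SOURCE B (Python) =====
-- def _parse_world_root_imports_exports(wit_text: str) -> tuple[list[str], list[str]]:
--     lines = [line.strip() for line in wit_text.splitlines()]
--     try:
--         start = lines.index("world root {")
--     except ValueError:
--         return [], []
--     block = lines[start + 1:]
--     if "}" in block:
--         block = block[:block.index("}")]
--     imports: list[str] = []
--     exports: list[str] = []
--     for s in block:
--         if s.startswith("import "):
--             imports.append(s[len("import "):].rstrip(";").strip())
--         elif s.startswith("export "):
--             exports.append(s[len("export "):].rstrip(";").strip())
--     return imports, exports
-- ===== Notes on version B (the rewrite author's own statement) =====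
-- stated objective: simpler
-- what changed: Replaces the stateful flag-driven single pass (inside flag, continue/break) by a boundary-location decomposition: strip all lines once, locate the block with list.index('world root {'), truncate at the first '}', then filter the isolated block for import/export lines.
import Mathlib
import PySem

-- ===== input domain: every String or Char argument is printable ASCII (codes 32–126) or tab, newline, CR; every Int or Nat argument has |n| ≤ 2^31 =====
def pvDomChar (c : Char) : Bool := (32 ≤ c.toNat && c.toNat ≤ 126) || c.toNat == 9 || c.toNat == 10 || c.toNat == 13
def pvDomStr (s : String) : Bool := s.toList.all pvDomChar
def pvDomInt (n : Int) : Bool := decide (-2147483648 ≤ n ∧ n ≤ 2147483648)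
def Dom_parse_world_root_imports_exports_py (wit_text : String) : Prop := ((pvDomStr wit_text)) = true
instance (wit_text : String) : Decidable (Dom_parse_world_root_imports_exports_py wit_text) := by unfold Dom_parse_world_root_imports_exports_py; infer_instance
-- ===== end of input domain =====

-- ===== PORT A =====
-- B changes the loop decomposition only (flag-driven single pass -> locate block, truncate, filter);
-- both programs agree everywhere, so this file proves exact equivalence (no Pre_).

-- s[len("import "):].rstrip(";").strip() -- shared verbatim by both Pythons; rstrip(";") ported by hand
-- (drop trailing ';' characters), exact for any string.
def trimItem (s : String) : String :=
  PySem.Str.strip (String.ofList (((PySem.Str.slice s (some 7) none).toList.reverse.dropWhile (fun c => c = ';')).reverse))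

-- the for-loop of A with its inside flag, continue and break, as structural recursion
def aLoop : List String → Bool → List String → List String → List String × List String
  | [], _, imports, exports => (imports, exports)
  | line :: rest, inside, imports, exports =>
    let s := PySem.Str.strip line
    if s = "world root {" then aLoop rest true imports exports
    else if inside && (s = "}" : Bool) then (imports, exports)
    else if !inside then aLoop rest inside imports exports
    else if PySem.Str.startswith s "import " then aLoop rest inside (imports ++ [trimItem s]) exports
    else if PySem.Str.startswith s "export " then aLoop rest inside imports (exports ++ [trimItem s])
    else aLoop rest inside imports exports

def parse_world_root_imports_exports_py (wit_text : String) : List String × List String :=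
  aLoop (PySem.Str.splitlines wit_text) false [] []

-- ===== PORT B =====
-- if "}" in block: block = block[:block.index("}")]
def bTrunc (block : List String) : List String :=
  if "}" ∈ block then
    match PySem.List.index? block "}" with
    | some j => PySem.List.slice block none (some (j : Int))
    | none => block
  else block

-- the final filter loop of B over the isolated block
def bCollect (block : List String) : List String × List String :=
  block.foldl (fun acc s =>
    if PySem.Str.startswith s "import " then (acc.1 ++ [trimItem s], acc.2)
    else if PySem.Str.startswith s "export " then (acc.1, acc.2 ++ [trimItem s])
    else acc) ([], [])

def parse_world_root_imports_exports_py_alt (wit_text : String) : List String × List String :=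
  match PySem.List.index? ((PySem.Str.splitlines wit_text).map PySem.Str.strip) "world root {" with
  | none => ([], [])
  | some start =>
    bCollect (bTrunc (PySem.List.slice ((PySem.Str.splitlines wit_text).map PySem.Str.strip)
      (some ((start : Int) + 1)) none))

-- ===== PRECONDITION & SPEC =====
def Spec_parse_world_root_imports_exports_py (wit_text : String) (out : List String × List String) : Prop := out = parse_world_root_imports_exports_py_alt wit_text
instance (wit_text : String) (out : List String × List String) : Decidable (Spec_parse_world_root_imports_exports_py wit_text out) := by unfold Spec_parse_world_root_imports_exports_py; infer_instance

-- ===== CLAIM (what is proved, stated in full; the proofs are below) =====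
def Claim_equal_parse_world_root_imports_exports_py : Prop := ∀ (wit_text : String), Dom_parse_world_root_imports_exports_py wit_text → Spec_parse_world_root_imports_exports_py wit_text (parse_world_root_imports_exports_py wit_text)

-- ===== LEMMAS AND PROOFS =====

-- proof-side version of A's loop on the pre-stripped lines
def aLoopS : List String → Bool → List String → List String → List String × List String
  | [], _, imports, exports => (imports, exports)
  | s :: rest, inside, imports, exports =>
    if s = "world root {" then aLoopS rest true imports exports
    else if inside && (s = "}" : Bool) then (imports, exports)
    else if !inside then aLoopS rest inside imports exports
    else if PySem.Str.startswith s "import " then aLoopS rest inside (imports ++ [trimItem s]) exports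
    else if PySem.Str.startswith s "export " then aLoopS rest inside imports (exports ++ [trimItem s])
    else aLoopS rest inside imports exports

lemma aLoop_eq_aLoopS : ∀ (ls : List String) (b : Bool) (i e : List String),
    aLoop ls b i e = aLoopS (ls.map PySem.Str.strip) b i e := by
  intro ls
  induction ls with
  | nil => intro b i e; rfl
  | cons l rest ih =>
    intro b i e
    simp only [aLoop, aLoopS, List.map_cons, ih]

lemma aLoopS_inside : ∀ (ss : List String) (i e : List String),
    aLoopS ss true i e = (ss.takeWhile (fun s => s ≠ "}")).foldl
      (fun acc s =>
        if PySem.Str.startswith s "import " then (acc.1 ++ [trimItem s], acc.2)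
        else if PySem.Str.startswith s "export " then (acc.1, acc.2 ++ [trimItem s])
        else acc) (i, e) := by
  intro ss
  induction ss with
  | nil => intro i e; rfl
  | cons s rest ih =>
    intro i e
    by_cases hb : s = "}"
    · subst hb
      simp [aLoopS]
    · rw [List.takeWhile_cons, if_pos (by simp [hb] : ((fun s : String => decide (s ≠ "}")) s) = true), List.foldl_cons]
      rw [aLoopS]
      by_cases hw : s = "world root {"
      · subst hw
        rw [if_pos rfl, ih]
        rw [if_neg (by decide : ¬ (PySem.Str.startswith "world root {" "import " = true)),
          if_neg (by decide : ¬ (PySem.Str.startswith "world root {" "export " = true))]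
      · rw [if_neg hw]
        rw [show (true && (s = "}" : Bool)) = decide (s = "}") from Bool.true_and _]
        rw [if_neg (by simp [hb] : ¬ (decide (s = "}") = true))]
        rw [if_neg (by simp : ¬ ((!true) = true))]
        show (if PySem.Str.startswith s "import " then aLoopS rest true (i ++ [trimItem s]) e
              else if PySem.Str.startswith s "export " then aLoopS rest true i (e ++ [trimItem s])
              else aLoopS rest true i e) =
            List.foldl _ (if PySem.Str.startswith s "import " then (i ++ [trimItem s], e)
              else if PySem.Str.startswith s "export " then (i, e ++ [trimItem s])
              else (i, e)) _
        split_ifs with hi he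
        · exact ih _ _
        · exact ih _ _
        · exact ih _ _

lemma bTrunc_eq_takeWhile : ∀ (bl : List String),
    bTrunc bl = bl.takeWhile (fun s => s ≠ "}") := by
  intro bl
  induction bl with
  | nil => rfl
  | cons s rest ih =>
    by_cases hb : s = "}"
    · subst hb
      unfold bTrunc
      rw [if_pos List.mem_cons_self, PySem.List.index?_cons_self]
      show PySem.List.slice ("}" :: rest) none (some ((0 : Nat) : Int)) = _
      rw [List.takeWhile_cons, if_neg (by simp : ¬ (((fun s : String => decide (s ≠ "}")) "}") = true))]
      rw [show PySem.List.slice ("}" :: rest) none (some ((0 : Nat) : Int)) = List.take 0 ("}" :: rest) from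
        PySem.List.slice_to_natCast _ 0]
      rfl
    · by_cases hr : "}" ∈ rest
      · obtain ⟨j, hj⟩ : ∃ j, PySem.List.index? rest "}" = some j :=
          Option.isSome_iff_exists.mp ((PySem.List.index?_isSome_iff rest "}").mpr hr)
        have hmem' : "}" ∈ s :: rest := List.mem_cons_of_mem _ hr
        have ih' : PySem.List.slice rest none (some ((j : Nat) : Int))
            = rest.takeWhile (fun s => s ≠ "}") := by
          unfold bTrunc at ih
          rw [if_pos hr, hj] at ih
          exact ih
        unfold bTrunc
        rw [if_pos hmem', PySem.List.index?_cons_of_ne _ hb, hj]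
        show PySem.List.slice (s :: rest) none (some (((j + 1 : Nat)) : Int)) = _
        rw [PySem.List.slice_to_natCast _ (j + 1), List.take_succ_cons]
        rw [show List.take j rest = PySem.List.slice rest none (some ((j : Nat) : Int)) from
          (PySem.List.slice_to_natCast _ j).symm]
        rw [ih', List.takeWhile_cons, if_pos (by simp [hb] : ((fun s : String => decide (s ≠ "}")) s) = true)]
      · have hmem : "}" ∉ s :: rest := by
          intro h
          rcases List.mem_cons.mp h with h | h
          · exact hb h.symm
          · exact hr h
        have hTW : rest.takeWhile (fun s : String => decide (s ≠ "}")) = rest := by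
          rw [List.takeWhile_eq_self_iff]
          intro x hx
          simp only [ne_eq, decide_eq_true_eq]
          intro hxe; exact hr (hxe ▸ hx)
        unfold bTrunc
        rw [if_neg hmem, List.takeWhile_cons,
          if_pos (by simp [hb] : ((fun s : String => decide (s ≠ "}")) s) = true), hTW]

lemma aLoopS_outside : ∀ (ss : List String),
    aLoopS ss false [] [] =
      (match PySem.List.index? ss "world root {" with
       | none => (([] : List String), ([] : List String))
       | some i => aLoopS (ss.drop (i + 1)) true [] []) := by
  intro ss
  induction ss with
  | nil => rfl
  | cons s rest ih =>
    by_cases hw : s = "world root {"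
    · subst hw
      rw [PySem.List.index?_cons_self]
      rw [aLoopS, if_pos rfl]
      rfl
    · rw [PySem.List.index?_cons_of_ne _ hw]
      rw [aLoopS, if_neg hw]
      rw [show (false && (s = "}" : Bool)) = false from Bool.false_and _]
      rw [if_neg (by simp : ¬ ((false : Bool) = true))]
      rw [if_pos (by simp : ((!false) = true))]
      rw [ih]
      cases h : PySem.List.index? rest "world root {" with
      | none => rfl
      | some i => rfl

theorem parse_world_root_imports_exports_py_equal (wit_text : String) :
    parse_world_root_imports_exports_py wit_text = parse_world_root_imports_exports_py_alt wit_text := by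
  unfold parse_world_root_imports_exports_py parse_world_root_imports_exports_py_alt
  rw [aLoop_eq_aLoopS, aLoopS_outside]
  cases hidx : PySem.List.index? ((PySem.Str.splitlines wit_text).map PySem.Str.strip) "world root {" with
  | none => rfl
  | some i =>
    have hslice : PySem.List.slice ((PySem.Str.splitlines wit_text).map PySem.Str.strip) (some ((i : Int) + 1)) none
        = ((PySem.Str.splitlines wit_text).map PySem.Str.strip).drop (i + 1) := by
      have := PySem.List.slice_from_natCast ((PySem.Str.splitlines wit_text).map PySem.Str.strip) (i + 1)
      push_cast at this
      exact this
    show aLoopS _ true [] [] = bCollect (bTrunc (PySem.List.slice _ (some ((i : Int) + 1)) none))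
    rw [hslice, bTrunc_eq_takeWhile, aLoopS_inside]
    rfl

-- ===== VERDICT (by name: the statement is the Claim_ definition above) =====
theorem parse_world_root_imports_exports_py_spec : Claim_equal_parse_world_root_imports_exports_py := by
  intro wit_text _
  unfold Spec_parse_world_root_imports_exports_py
  exact parse_world_root_imports_exports_py_equal wit_text
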